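-- pv_equiv track=rewrite | github.com/bullyassistance/bureau-bullies | backend/app.py | _purchase_product_from_tags
-- ===== SOURCE A (Python) =====
-- def _purchase_product_from_tags(tags: list) -> str:
--     """Map tag list to a human product name."""
--     tags_l = [str(t).lower() for t in (tags or [])]
--     if any("dfy" in t or "1500" in t or "2000" in t or "2500" in t or "pif" in t for t in tags_l):
--         return "DFY"
--     if any("vault" in t or "$66" in t or "66" in t for t in tags_l):
--         return "Dispute Vault ($66)"
--     if any("toolkit" in t or "$17" in t or "17" in t or t == "ck-purchased" for t in tags_l):
--         return "Collection Toolkit ($17)"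
--     return "(unknown product)"
-- ===== SOURCE B (Python) =====
-- def _purchase_product_from_tags(tags: list) -> str:
--     """Map tag list to a human product name (single pass, best-priority accumulator)."""
--     cats = [
--         ("DFY", lambda t: any(s in t for s in ("dfy", "1500", "2000", "2500", "pif"))),
--         ("Dispute Vault ($66)", lambda t: any(s in t for s in ("vault", "$66", "66"))),
--         ("Collection Toolkit ($17)",
--          lambda t: any(s in t for s in ("toolkit", "$17", "17")) or t == "ck-purchased"),
--     ]
--     best = 3
--     for t in (tags or []):
--         tl = str(t).lower()
--         for i in range(best):
--             if cats[i][1](tl):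
--                 best = i
--                 break
--         if best == 0:
--             break
--     return cats[best][0] if best < 3 else "(unknown product)"
-- ===== Notes on version B (the rewrite author's own statement) =====
-- stated objective: alternative
-- what changed: Replaced A's three separate short-circuiting any() scans over the lowered tag list by a single pass over the tags that maintains a best-priority accumulator against a table of (name, predicate) categories, with early exit when the top category is hit.
import Mathlib
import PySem

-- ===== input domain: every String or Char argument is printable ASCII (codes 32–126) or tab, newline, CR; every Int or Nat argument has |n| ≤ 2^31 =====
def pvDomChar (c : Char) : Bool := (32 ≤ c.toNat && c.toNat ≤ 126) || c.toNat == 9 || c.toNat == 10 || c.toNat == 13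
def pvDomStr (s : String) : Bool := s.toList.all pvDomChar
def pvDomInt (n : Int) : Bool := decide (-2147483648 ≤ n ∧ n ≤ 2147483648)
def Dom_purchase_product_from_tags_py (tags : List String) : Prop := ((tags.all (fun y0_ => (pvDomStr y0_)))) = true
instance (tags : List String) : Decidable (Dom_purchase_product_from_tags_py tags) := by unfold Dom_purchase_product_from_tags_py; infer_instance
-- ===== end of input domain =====

-- B replaces A's three separate short-circuiting any() passes by ONE pass over the tags
-- maintaining a best-priority accumulator over a table of (name, predicate) categories (objective: alternative decomposition).

-- ===== PORT A =====
def purchase_product_from_tags_py (tags : List String) : String :=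
  let tags_l := tags.map (fun t => PySem.Str.lower t)
  if tags_l.any (fun t => PySem.Str.isIn "dfy" t || PySem.Str.isIn "1500" t ||
      PySem.Str.isIn "2000" t || PySem.Str.isIn "2500" t || PySem.Str.isIn "pif" t) then
    "DFY"
  else if tags_l.any (fun t => PySem.Str.isIn "vault" t || PySem.Str.isIn "$66" t ||
      PySem.Str.isIn "66" t) then
    "Dispute Vault ($66)"
  else if tags_l.any (fun t => PySem.Str.isIn "toolkit" t || PySem.Str.isIn "$17" t ||
      PySem.Str.isIn "17" t || t == "ck-purchased") then
    "Collection Toolkit ($17)"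
  else "(unknown product)"

-- ===== PORT B =====
-- the category table: name and matching predicate, in priority order
def pvCatName (i : Nat) : String :=
  match i with
  | 0 => "DFY"
  | 1 => "Dispute Vault ($66)"
  | _ => "Collection Toolkit ($17)"

def pvCatPred (i : Nat) (t : String) : Bool :=
  match i with
  | 0 => PySem.Str.isIn "dfy" t || PySem.Str.isIn "1500" t || PySem.Str.isIn "2000" t ||
         PySem.Str.isIn "2500" t || PySem.Str.isIn "pif" t
  | 1 => PySem.Str.isIn "vault" t || PySem.Str.isIn "$66" t || PySem.Str.isIn "66" t
  | _ => PySem.Str.isIn "toolkit" t || PySem.Str.isIn "$17" t || PySem.Str.isIn "17" t ||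
         t == "ck-purchased"

-- inner loop: 'for i in range(best): if cats[i][1](tl): best = i; break'
def pvScanCat (idxs : List Nat) (tl : String) (best : Nat) : Nat :=
  match idxs with
  | [] => best
  | i :: rest => if pvCatPred i tl then i else pvScanCat rest tl best

-- outer loop: 'for t in (tags or []): … ; if best == 0: break'
def pvBestLoop (ts : List String) (best : Nat) : Nat :=
  match ts with
  | [] => best
  | t :: rest =>
      let tl := PySem.Str.lower t
      let best' := pvScanCat (List.range best) tl best
      if best' == 0 then best' else pvBestLoop rest best'

def purchase_product_from_tags_py_alt (tags : List String) : String :=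
  let best := pvBestLoop tags 3
  if best < 3 then pvCatName best else "(unknown product)"

-- ===== PRECONDITION & SPEC =====
def Spec_purchase_product_from_tags_py (tags : List String) (out : String) : Prop := out = purchase_product_from_tags_py_alt tags
instance (tags : List String) (out : String) : Decidable (Spec_purchase_product_from_tags_py tags out) := by unfold Spec_purchase_product_from_tags_py; infer_instance

-- ===== CLAIM (what is proved, stated in full; the proofs are below) =====
def Claim_equal_purchase_product_from_tags_py : Prop := ∀ (tags : List String), Dom_purchase_product_from_tags_py tags → Spec_purchase_product_from_tags_py tags (purchase_product_from_tags_py tags)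

-- ===== LEMMAS AND PROOFS =====

-- proof-only: the lowest category index a lowered tag matches (3 = none)
def pvMCat (tl : String) : Nat :=
  if pvCatPred 0 tl then 0 else if pvCatPred 1 tl then 1 else if pvCatPred 2 tl then 2 else 3

-- proof-only: minimum category over a tag list
def pvMu (ts : List String) : Nat :=
  ts.foldr (fun t a => min (pvMCat (PySem.Str.lower t)) a) 3

theorem pvScanCat_eq (tl : String) (b : Nat) (hb : b ≤ 3) :
    pvScanCat (List.range b) tl b = min b (pvMCat tl) := by
  interval_cases b <;>
    simp only [pvScanCat, List.range_succ, List.range_zero, List.nil_append, List.cons_append,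
      pvMCat] <;>
    cases h0 : pvCatPred 0 tl <;> cases h1 : pvCatPred 1 tl <;> cases h2 : pvCatPred 2 tl <;>
    simp_all

theorem pvMu_le_three (ts : List String) : pvMu ts ≤ 3 := by
  induction ts with
  | nil => simp [pvMu]
  | cons t r ih => simp only [pvMu, List.foldr] at *; omega

theorem pvBestLoop_eq (ts : List String) (b : Nat) (hb : b ≤ 3) :
    pvBestLoop ts b = min b (pvMu ts) := by
  induction ts generalizing b with
  | nil => simp [pvBestLoop, pvMu, Nat.min_eq_left hb]
  | cons t r ih =>
      have hmu : pvMu (t :: r) = min (pvMCat (PySem.Str.lower t)) (pvMu r) := rfl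
      have hr := pvMu_le_three r
      simp only [pvBestLoop, pvScanCat_eq _ b hb]
      by_cases h : min b (pvMCat (PySem.Str.lower t)) = 0
      · rw [if_pos (by simp [h]), hmu]; omega
      · rw [if_neg (by simp [h]), ih _ (by omega), hmu]; omega

theorem pvMu_le_iff (ts : List String) (k : Nat) (hk : k < 3) :
    pvMu ts ≤ k ↔ ∃ t ∈ ts, pvMCat (PySem.Str.lower t) ≤ k := by
  induction ts with
  | nil => simp [pvMu]; omega
  | cons t r ih =>
      have h : pvMu (t :: r) = min (pvMCat (PySem.Str.lower t)) (pvMu r) := rfl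
      rw [h]
      simp only [List.mem_cons, exists_eq_or_imp]
      constructor
      · intro hle
        by_cases hm : pvMCat (PySem.Str.lower t) ≤ k
        · exact Or.inl hm
        · exact Or.inr (ih.mp (by omega))
      · rintro (hle | hle)
        · omega
        · have := ih.mpr hle; omega

theorem pvMCat_le_iff (tl : String) (k : Nat) (hk : k < 3) :
    pvMCat tl ≤ k ↔ ∃ i ≤ k, pvCatPred i tl = true := by
  unfold pvMCat
  split_ifs with h0 h1 h2 <;> constructor <;> intro h
  · exact ⟨0, by omega, h0⟩
  · omega
  · exact ⟨1, by omega, h1⟩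
  · rcases h with ⟨i, hi, hp⟩
    have hi3 : i < 3 := by omega
    interval_cases i <;> simp_all <;> try omega
  · exact ⟨2, by omega, h2⟩
  · rcases h with ⟨i, hi, hp⟩
    have hi3 : i < 3 := by omega
    interval_cases i <;> simp_all <;> try omega
  · omega
  · rcases h with ⟨i, hi, hp⟩
    have hi3 : i < 3 := by omega
    interval_cases i <;> simp_all <;> try omega

theorem pv_main (tags : List String) :
    purchase_product_from_tags_py tags = purchase_product_from_tags_py_alt tags := by
  have hmu3 := pvMu_le_three tags
  have hB : purchase_product_from_tags_py_alt tags =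
      (if pvMu tags < 3 then pvCatName (pvMu tags) else "(unknown product)") := by
    unfold purchase_product_from_tags_py_alt
    rw [pvBestLoop_eq tags 3 (by omega), Nat.min_eq_right hmu3]
  have key : ∀ k : Nat,
      ((tags.map (fun t => PySem.Str.lower t)).any (fun t => pvCatPred k t) = true ↔
        ∃ t ∈ tags, pvCatPred k (PySem.Str.lower t) = true) := by
    intro k; simp
  unfold purchase_product_from_tags_py
  simp only []
  split_ifs with h0 h1 h2
  · have hle : pvMu tags ≤ 0 := by
      rw [pvMu_le_iff _ _ (by omega)]
      obtain ⟨t, ht, hp⟩ := (key 0).mp h0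
      exact ⟨t, ht, (pvMCat_le_iff _ 0 (by omega)).mpr ⟨0, le_refl _, hp⟩⟩
    have h : pvMu tags = 0 := by omega
    rw [hB, h]; simp [pvCatName]
  · have hle : pvMu tags ≤ 1 := by
      rw [pvMu_le_iff _ _ (by omega)]
      obtain ⟨t, ht, hp⟩ := (key 1).mp h1
      exact ⟨t, ht, (pvMCat_le_iff _ 1 (by omega)).mpr ⟨1, le_refl _, hp⟩⟩
    have hne : pvMu tags ≠ 0 := by
      intro hz
      obtain ⟨t, ht, hm⟩ := (pvMu_le_iff tags 0 (by omega)).mp (by omega)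
      obtain ⟨i, hi, hp⟩ := (pvMCat_le_iff _ 0 (by omega)).mp hm
      have : i = 0 := by omega
      subst this
      exact h0 ((key 0).mpr ⟨t, ht, hp⟩)
    have h : pvMu tags = 1 := by omega
    rw [hB, h]; simp [pvCatName]
  · have hle : pvMu tags ≤ 2 := by
      rw [pvMu_le_iff _ _ (by omega)]
      obtain ⟨t, ht, hp⟩ := (key 2).mp h2
      exact ⟨t, ht, (pvMCat_le_iff _ 2 (by omega)).mpr ⟨2, le_refl _, hp⟩⟩
    have hne : ¬ pvMu tags ≤ 1 := by
      intro hz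
      obtain ⟨t, ht, hm⟩ := (pvMu_le_iff tags 1 (by omega)).mp hz
      obtain ⟨i, hi, hp⟩ := (pvMCat_le_iff _ 1 (by omega)).mp hm
      interval_cases i
      · exact h0 ((key 0).mpr ⟨t, ht, hp⟩)
      · exact h1 ((key 1).mpr ⟨t, ht, hp⟩)
    have h : pvMu tags = 2 := by omega
    rw [hB, h]; simp [pvCatName]
  · have hge : ¬ pvMu tags ≤ 2 := by
      intro hz
      obtain ⟨t, ht, hm⟩ := (pvMu_le_iff tags 2 (by omega)).mp hz
      obtain ⟨i, hi, hp⟩ := (pvMCat_le_iff _ 2 (by omega)).mp hm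
      interval_cases i
      · exact h0 ((key 0).mpr ⟨t, ht, hp⟩)
      · exact h1 ((key 1).mpr ⟨t, ht, hp⟩)
      · exact h2 ((key 2).mpr ⟨t, ht, hp⟩)
    rw [hB, if_neg (by omega)]

-- ===== VERDICT (by name: the statement is the Claim_ definition above) =====
theorem purchase_product_from_tags_py_spec : Claim_equal_purchase_product_from_tags_py := by
  intro tags _; exact pv_main tags
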